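-- pv_equiv track=rewrite | github.com/Ab2021/infra | fixed_snowflake_agent.py | extract_unique_joins
-- ===== SOURCE A (Python) =====
-- def extract_unique_joins(columns):
--     """
--     Given a list of column dicts, extract unique {table_name, join_key} pairs.
--     """
--     join_pairs = set()
--     for col in columns:
--         # Safely handle 'JOIN_KEY' possibly missing in fallback scenario
--         join_key = col.get('JOIN_KEY', None)
--         table_name = col.get('table_name', None)
--         if join_key and table_name:
--             join_pairs.add( (table_name, join_key) )
--     # Convert set of tuples to list of dicts if preferred
--     return [ {"table_name": t, "join_key": k} for (t,k) in sorted(join_pairs) ]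
-- ===== SOURCE B (Python) =====
-- def extract_unique_joins(columns):
--     pairs = []
--     for col in columns:
--         join_key = col.get('JOIN_KEY', None)
--         table_name = col.get('table_name', None)
--         if join_key and table_name:
--             pairs.append((table_name, join_key))
--     pairs.sort()
--     out = []
--     prev = None
--     for p in pairs:
--         if p != prev:
--             out.append({"table_name": p[0], "join_key": p[1]})
--             prev = p
--     return out
-- ===== Notes on version B (the rewrite author's own statement) =====
-- stated objective: alternative
-- what changed: Replaces the hash-set deduplication (collect unique pairs in a set, then sort) by sort-then-unique: collect all qualifying pairs in a plain list with duplicates, sort it, and emit a dict only when the tuple differs from the previous one.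
import Mathlib
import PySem

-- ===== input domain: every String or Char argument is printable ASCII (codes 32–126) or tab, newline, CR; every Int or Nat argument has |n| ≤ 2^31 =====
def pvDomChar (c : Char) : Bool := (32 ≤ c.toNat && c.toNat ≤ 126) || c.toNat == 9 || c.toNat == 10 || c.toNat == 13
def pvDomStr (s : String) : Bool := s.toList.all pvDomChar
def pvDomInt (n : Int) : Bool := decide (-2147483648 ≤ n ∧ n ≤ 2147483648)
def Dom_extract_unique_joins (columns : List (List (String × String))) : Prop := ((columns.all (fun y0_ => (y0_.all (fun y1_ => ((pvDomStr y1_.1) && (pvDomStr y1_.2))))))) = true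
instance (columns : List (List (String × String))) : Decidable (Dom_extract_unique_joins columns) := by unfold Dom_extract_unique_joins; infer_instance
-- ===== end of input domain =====

-- B replaces A's hash-set deduplication by sort-then-adjacent-unique over a plain list (alternative decomposition, same cost).

-- ===== PORT A =====
-- col.get('JOIN_KEY', None) / col.get('table_name', None): first-match lookup on the association list, via PySem.Dict
def extract_unique_joins (columns : List (List (String × String))) : List (List (String × String)) :=
  let join_pairs : PySem.Set (String × String) :=
    columns.foldl (fun s col =>
      match (PySem.Dict.mk col).get? "JOIN_KEY", (PySem.Dict.mk col).get? "table_name" with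
      | some join_key, some table_name =>
          if join_key ≠ "" ∧ table_name ≠ "" then PySem.Set.add s (table_name, join_key) else s
      | _, _ => s) PySem.Set.empty
  (PySem.List.sorted2 join_pairs Prod.fst Prod.snd).map
    (fun p => [("table_name", p.1), ("join_key", p.2)])

-- ===== PORT B =====
def extract_unique_joins_alt (columns : List (List (String × String))) : List (List (String × String)) :=
  let pairs : List (String × String) :=
    columns.foldl (fun acc col =>
      let join_key := (PySem.Dict.mk col).get? "JOIN_KEY"
      let table_name := (PySem.Dict.mk col).get? "table_name"
      if join_key.getD "" ≠ "" ∧ table_name.getD "" ≠ "" then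
        acc ++ [(table_name.getD "", join_key.getD "")]
      else acc) []
  let sortedPairs := PySem.List.sorted2 pairs Prod.fst Prod.snd
  (sortedPairs.foldl
    (fun (st : List (List (String × String)) × Option (String × String)) p =>
      if some p ≠ st.2 then (st.1 ++ [[("table_name", p.1), ("join_key", p.2)]], some p) else st)
    ([], none)).1

-- ===== PRECONDITION & SPEC =====
def Spec_extract_unique_joins (columns : List (List (String × String))) (out : List (List (String × String))) : Prop := out = extract_unique_joins_alt columns
instance (columns : List (List (String × String))) (out : List (List (String × String))) : Decidable (Spec_extract_unique_joins columns out) := by unfold Spec_extract_unique_joins; infer_instance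

-- ===== CLAIM (what is proved, stated in full; the proofs are below) =====
def Claim_equal_extract_unique_joins : Prop := ∀ (columns : List (List (String × String))), Dom_extract_unique_joins columns → Spec_extract_unique_joins columns (extract_unique_joins columns)

-- ===== LEMMAS AND PROOFS =====

-- the strict lexicographic tuple order Python uses on (table_name, join_key)
def pvLt (a b : String × String) : Prop := a.1 < b.1 ∨ (a.1 = b.1 ∧ a.2 < b.2)
def pvLe (a b : String × String) : Prop := ¬ pvLt b a

-- sorted2's comparison function for k1 = fst, k2 = snd
def pvBefore (a b : String × String) : Bool :=
  decide (a.1 < b.1) || (!decide (b.1 < a.1) && decide (a.2 < b.2))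

lemma pvBefore_iff (a b : String × String) : pvBefore a b = true ↔ pvLt a b := by
  simp only [pvBefore, pvLt, Bool.or_eq_true, Bool.and_eq_true, Bool.not_eq_true',
    decide_eq_true_eq, decide_eq_false_iff_not]
  constructor
  · rintro (h | ⟨h1, h2⟩)
    · exact Or.inl h
    · rcases lt_trichotomy a.1 b.1 with h | h | h
      · exact Or.inl h
      · exact Or.inr ⟨h, h2⟩
      · exact absurd h h1
  · rintro (h | ⟨h1, h2⟩)
    · exact Or.inl h
    · exact Or.inr ⟨by rw [h1]; exact lt_irrefl _, h2⟩

lemma pvLt_trans {a b c : String × String} (h1 : pvLt a b) (h2 : pvLt b c) : pvLt a c := by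
  rcases h1 with h1 | ⟨e1, l1⟩ <;> rcases h2 with h2 | ⟨e2, l2⟩
  · exact Or.inl (lt_trans h1 h2)
  · exact Or.inl (e2 ▸ h1)
  · exact Or.inl (e1 ▸ h2)
  · exact Or.inr ⟨e1.trans e2, lt_trans l1 l2⟩

lemma pvLt_irrefl (a : String × String) : ¬ pvLt a a := by
  rintro (h | ⟨_, h⟩) <;> exact lt_irrefl _ h

lemma pvLt_asymm {a b : String × String} (h : pvLt a b) : ¬ pvLt b a :=
  fun h' => pvLt_irrefl a (pvLt_trans h h')

lemma pvLe_antisymm {a b : String × String} (h1 : pvLe a b) (h2 : pvLe b a) : a = b := by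
  rcases a with ⟨a1, a2⟩; rcases b with ⟨b1, b2⟩
  simp only [pvLe, pvLt, not_or, not_and] at h1 h2
  rcases lt_trichotomy a1 b1 with h | h | h
  · exact absurd h h2.1
  · subst h
    rcases lt_trichotomy a2 b2 with h' | h' | h'
    · exact absurd h' (h2.2 rfl)
    · rw [h']
    · exact absurd h' (h1.2 rfl)
  · exact absurd h h1.1

lemma pvLe_of_ne_of_le {a b : String × String} (hle : pvLe a b) (hne : a ≠ b) : pvLt a b := by
  by_contra h
  exact hne (pvLe_antisymm hle h)

lemma pvLe_trans_lt {a b c : String × String} (h1 : pvLt a b) (h2 : pvLe b c) : pvLe a c := by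
  intro h
  exact h2 (pvLt_trans h h1)

-- insertBy with pvBefore preserves Pairwise pvLe
lemma insertBy_pairwise (x : String × String) (acc : List (String × String))
    (h : acc.Pairwise pvLe) :
    (PySem.List.insertBy pvBefore x acc).Pairwise pvLe := by
  induction acc with
  | nil => simp [PySem.List.insertBy, List.pairwise_cons, pvLe]
  | cons y ys ih =>
    rw [List.pairwise_cons] at h
    simp only [PySem.List.insertBy]
    split_ifs with hb
    · have hxy : pvLt x y := (pvBefore_iff x y).mp hb
      refine List.pairwise_cons.mpr ⟨?_, List.pairwise_cons.mpr ⟨h.1, h.2⟩⟩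
      intro z hz
      rcases List.mem_cons.mp hz with rfl | hz
      · exact pvLt_asymm hxy
      · exact pvLe_trans_lt hxy (h.1 z hz)
    · have hyx : pvLe y x := by
        intro hlt
        exact hb ((pvBefore_iff x y).mpr hlt)
      refine List.pairwise_cons.mpr ⟨?_, ih h.2⟩
      intro z hz
      rcases (PySem.List.mem_insertBy pvBefore x z ys).mp hz with rfl | hz
      · exact hyx
      · exact h.1 z hz

lemma foldl_insertBy_pairwise (l acc : List (String × String)) (h : acc.Pairwise pvLe) :
    (l.foldl (fun acc x => PySem.List.insertBy pvBefore x acc) acc).Pairwise pvLe := by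
  induction l generalizing acc with
  | nil => exact h
  | cons x xs ih => exact ih _ (insertBy_pairwise x acc h)

lemma sorted2_eq_foldl (l : List (String × String)) :
    PySem.List.sorted2 l Prod.fst Prod.snd =
      l.foldl (fun acc x => PySem.List.insertBy pvBefore x acc) [] := rfl

lemma sorted2_pairwise (l : List (String × String)) :
    (PySem.List.sorted2 l Prod.fst Prod.snd).Pairwise pvLe := by
  rw [sorted2_eq_foldl]
  exact foldl_insertBy_pairwise l [] (by simp)

-- adjacent dedup (B's second loop, abstractly)
def pvDedup (prev : Option (String × String)) : List (String × String) → List (String × String)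
  | [] => []
  | x :: xs => if some x ≠ prev then x :: pvDedup (some x) xs else pvDedup prev xs

lemma pvDedup_sublist (prev : Option (String × String)) (xs : List (String × String)) :
    (pvDedup prev xs).Sublist xs := by
  induction xs generalizing prev with
  | nil => simp [pvDedup]
  | cons x t ih =>
    simp only [pvDedup]
    split_ifs
    · exact (ih (some x)).cons₂ x
    · exact (ih prev).cons x

lemma mem_pvDedup (prev : Option (String × String)) (xs : List (String × String))
    (y : String × String) (hy : y ∈ xs) : y ∈ pvDedup prev xs ∨ some y = prev := by
  induction xs generalizing prev with
  | nil => cases hy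
  | cons x t ih =>
    have hsub : pvDedup (some x) t ⊆ pvDedup prev (x :: t) := by
      simp only [pvDedup]
      split_ifs with hb
      · exact fun z hz => List.mem_cons_of_mem x hz
      · push_neg at hb
        rw [hb]
        exact fun z hz => hz
    rcases List.mem_cons.mp hy with rfl | hy
    · simp only [pvDedup]
      split_ifs with hb
      · exact Or.inl (List.mem_cons_self)
      · push_neg at hb
        exact Or.inr hb
    · rcases ih (some x) hy with h | h
      · exact Or.inl (hsub h)
      · rcases Option.some_inj.mp h with rfl
        simp only [pvDedup]
        split_ifs with hb
        · exact Or.inl List.mem_cons_self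
        · push_neg at hb
          exact Or.inr hb

-- on a pvLe-sorted list, the dedup output is strictly increasing
def pvPrevLt (prev : Option (String × String)) (y : String × String) : Prop :=
  match prev with
  | none => True
  | some p => pvLt p y

lemma pvDedup_strict (xs : List (String × String)) (prev : Option (String × String))
    (hs : xs.Pairwise pvLe)
    (hp : ∀ y ∈ xs, match prev with | none => True | some p => pvLe p y) :
    (pvDedup prev xs).Pairwise pvLt ∧ ∀ y ∈ pvDedup prev xs, pvPrevLt prev y := by
  induction xs generalizing prev with
  | nil => simp [pvDedup]
  | cons x t ih =>
    rw [List.pairwise_cons] at hs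
    simp only [pvDedup]
    split_ifs with hb
    · -- some x ≠ prev : keep x
      have iht := ih (some x) hs.2 (fun y hy => hs.1 y hy)
      constructor
      · refine List.pairwise_cons.mpr ⟨?_, iht.1⟩
        intro z hz
        exact iht.2 z hz
      · intro y hy
        rcases List.mem_cons.mp hy with rfl | hy
        · cases prev with
          | none => trivial
          | some p =>
            have : pvLe p y := hp y List.mem_cons_self
            exact pvLe_of_ne_of_le this (fun h => hb (by rw [h]))
        · cases prev with
          | none => trivial
          | some p =>
            have h1 : pvLt p x := by
              have : pvLe p x := hp x List.mem_cons_self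
              exact pvLe_of_ne_of_le this (fun h => hb (by rw [h]))
            exact pvLt_trans h1 (iht.2 y hy)
    · -- some x = prev : skip
      push_neg at hb
      have iht := ih prev hs.2 ?side
      · exact iht
      case side =>
        intro y hy
        rw [← hb]
        exact hs.1 y hy

-- B's output loop computes map over pvDedup
lemma foldl_dedup (xs : List (String × String)) (acc : List (List (String × String)))
    (prev : Option (String × String)) :
    (xs.foldl
      (fun (st : List (List (String × String)) × Option (String × String)) p =>
        if some p ≠ st.2 then (st.1 ++ [[("table_name", p.1), ("join_key", p.2)]], some p) else st)
      (acc, prev)).1 =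
      acc ++ (pvDedup prev xs).map (fun p => [("table_name", p.1), ("join_key", p.2)]) := by
  induction xs generalizing acc prev with
  | nil => simp [pvDedup]
  | cons x t ih =>
    by_cases hb : some x ≠ prev
    · simp only [List.foldl_cons, pvDedup, if_pos hb]
      rw [ih]
      simp
    · simp only [List.foldl_cons, pvDedup, if_neg hb]
      push_neg at hb
      rw [← hb, ih]

-- A's set-building loop equals set(·) of B's pair list
lemma foldA_eq_ofList_foldB (columns : List (List (String × String)))
    (acc : List (String × String)) :
    columns.foldl (fun s col =>
      match (PySem.Dict.mk col).get? "JOIN_KEY", (PySem.Dict.mk col).get? "table_name" with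
      | some join_key, some table_name =>
          if join_key ≠ "" ∧ table_name ≠ "" then PySem.Set.add s (table_name, join_key) else s
      | _, _ => s) (PySem.Set.ofList acc) =
    PySem.Set.ofList (columns.foldl (fun acc col =>
      let join_key := (PySem.Dict.mk col).get? "JOIN_KEY"
      let table_name := (PySem.Dict.mk col).get? "table_name"
      if join_key.getD "" ≠ "" ∧ table_name.getD "" ≠ "" then
        acc ++ [(table_name.getD "", join_key.getD "")]
      else acc) acc) := by
  induction columns generalizing acc with
  | nil => rfl
  | cons col cols ih =>
    simp only [List.foldl_cons]
    rcases hj : (PySem.Dict.mk col).get? "JOIN_KEY" with _ | jk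
    · dsimp only
      rw [if_neg (by simp)]
      exact ih acc
    rcases ht : (PySem.Dict.mk col).get? "table_name" with _ | tn
    · dsimp only
      rw [if_neg (by simp)]
      exact ih acc
    dsimp only [Option.getD_some]
    split_ifs with hc
    · have : PySem.Set.add (PySem.Set.ofList acc) (tn, jk) = PySem.Set.ofList (acc ++ [(tn, jk)]) := by
        rw [PySem.Set.ofList_eq_foldl, PySem.Set.ofList_eq_foldl, List.foldl_append]
        rfl
      rw [this]
      exact ih (acc ++ [(tn, jk)])
    · exact ih acc

-- strictly sorted lists with the same elements coincide
lemma sorted_unique (l1 l2 : List (String × String)) (h : l1.Perm l2)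
    (h1 : l1.Pairwise pvLe) (h2 : l2.Pairwise pvLe) : l1 = l2 :=
  List.Perm.eq_of_pairwise (fun _ _ _ _ ha hb => pvLe_antisymm ha hb) h1 h2 h

-- ===== VERDICT (by name: the statement is the Claim_ definition above) =====
theorem extract_unique_joins_spec : Claim_equal_extract_unique_joins := by
  intro columns _
  unfold Spec_extract_unique_joins extract_unique_joins extract_unique_joins_alt
  set pairs : List (String × String) :=
    columns.foldl (fun acc col =>
      let join_key := (PySem.Dict.mk col).get? "JOIN_KEY"
      let table_name := (PySem.Dict.mk col).get? "table_name"
      if join_key.getD "" ≠ "" ∧ table_name.getD "" ≠ "" then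
        acc ++ [(table_name.getD "", join_key.getD "")]
      else acc) [] with hpairs
  have hA : columns.foldl (fun s col =>
      match (PySem.Dict.mk col).get? "JOIN_KEY", (PySem.Dict.mk col).get? "table_name" with
      | some join_key, some table_name =>
          if join_key ≠ "" ∧ table_name ≠ "" then PySem.Set.add s (table_name, join_key) else s
      | _, _ => s) PySem.Set.empty = PySem.Set.ofList pairs := by
    have := foldA_eq_ofList_foldB columns []
    simpa [PySem.Set.empty] using this
  simp only [hA, foldl_dedup, List.nil_append]
  congr 1
  -- sorted2 (set pairs) = pvDedup none (sorted2 pairs)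
  have hsp : (PySem.List.sorted2 pairs Prod.fst Prod.snd).Pairwise pvLe := sorted2_pairwise pairs
  have hstrict := pvDedup_strict (PySem.List.sorted2 pairs Prod.fst Prod.snd) none hsp (by intro y _; trivial)
  have hded_le : (pvDedup none (PySem.List.sorted2 pairs Prod.fst Prod.snd)).Pairwise pvLe :=
    List.Pairwise.imp (fun {a b} h => pvLt_asymm h) hstrict.1
  have hded_nodup : (pvDedup none (PySem.List.sorted2 pairs Prod.fst Prod.snd)).Nodup :=
    List.Pairwise.imp (R := pvLt) (S := fun a b => a ≠ b)
      (fun {a b} h he => pvLt_irrefl b (he ▸ h)) hstrict.1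
  apply sorted_unique
  · -- Perm
    have hperm1 : (PySem.List.sorted2 (PySem.Set.ofList pairs) Prod.fst Prod.snd).Perm (PySem.Set.ofList pairs) :=
      PySem.List.sorted2_perm _ _ _ _
    have hnd1 : (PySem.List.sorted2 (PySem.Set.ofList pairs) Prod.fst Prod.snd).Nodup :=
      hperm1.nodup_iff.mpr (PySem.Set.nodup_ofList pairs)
    have hmem : ∀ y, y ∈ pvDedup none (PySem.List.sorted2 pairs Prod.fst Prod.snd) ↔
        y ∈ PySem.List.sorted2 (PySem.Set.ofList pairs) Prod.fst Prod.snd := by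
      intro y
      constructor
      · intro hy
        have := (pvDedup_sublist none _).subset hy
        have h2 : y ∈ pairs := by
          have := (PySem.List.sorted2_perm pairs Prod.fst Prod.snd false).mem_iff.mp this
          exact this
        exact hperm1.mem_iff.mpr ((PySem.Set.mem_ofList pairs y).mpr h2)
      · intro hy
        have h1 : y ∈ pairs := (PySem.Set.mem_ofList pairs y).mp (hperm1.mem_iff.mp hy)
        have h2 : y ∈ PySem.List.sorted2 pairs Prod.fst Prod.snd :=
          (PySem.List.sorted2_perm pairs Prod.fst Prod.snd false).mem_iff.mpr h1
        rcases mem_pvDedup none _ y h2 with h | h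
        · exact h
        · cases h
    exact (List.perm_ext_iff_of_nodup hnd1 hded_nodup).mpr (fun y => (hmem y).symm)
  · exact sorted2_pairwise _
  · exact hded_le
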